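-- pv_equiv track=rewrite | github.com/1r0nw1ll/quantum-arithmetic-research | qa_alphageometry_ptolemy/qa_orbit_resonance_attention_cert_v1/qa_orbit_resonance_attention_cert_validate.py | _classify_orbit
-- ===== SOURCE A (Python) =====
-- def qa_mod(x, m):
--     return ((int(x) - 1) % m) + 1
--
-- def qa_step(b, e, m):
--     return (e, qa_mod(b + e, m))
--
-- def _classify_orbit(b, e, m):
--     """Coarse orbit class via orbit length: singularity(1) / satellite / cosmos."""
--     seen = set()
--     cur = (b, e)
--     while cur not in seen:
--         seen.add(cur)
--         cur = qa_step(cur[0], cur[1], m)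
--     length = len(seen)
--     if length == 1:
--         return "singularity"
--     # On S_9 cosmos is length 24, satellite length 8
--     if length == 24:
--         return "cosmos"
--     return "satellite"
-- ===== SOURCE B (Python) =====
-- def _classify_orbit(b, e, m):
--     """Tail+cycle walk in O(1) memory: count the unnormalized tail (mu), then
--     walk once around the cycle from the first fully-normalized state (lam)."""
--     def norm(x):
--         return ((x - 1) % m) + 1
--     mu = 0
--     cur = (b, e)
--     while cur[0] != norm(cur[0]) or cur[1] != norm(cur[1]):
--         mu += 1
--         cur = (cur[1], norm(cur[0] + cur[1]))
--     lam = 1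
--     x = (cur[1], norm(cur[0] + cur[1]))
--     while x != cur:
--         lam += 1
--         x = (x[1], norm(x[0] + x[1]))
--     n = mu + lam
--     if n == 1:
--         return "singularity"
--     if n == 24:
--         return "cosmos"
--     return "satellite"
-- ===== Notes on version B (the rewrite author's own statement) =====
-- stated objective: faster
-- what changed: Replaces A's growing `seen`-set membership loop by an O(1)-memory tail-plus-cycle walk: count the (at most 2) unnormalized tail states, then walk once around the cycle from the first fully normalized state; classify mu+lam.
import Mathlib
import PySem

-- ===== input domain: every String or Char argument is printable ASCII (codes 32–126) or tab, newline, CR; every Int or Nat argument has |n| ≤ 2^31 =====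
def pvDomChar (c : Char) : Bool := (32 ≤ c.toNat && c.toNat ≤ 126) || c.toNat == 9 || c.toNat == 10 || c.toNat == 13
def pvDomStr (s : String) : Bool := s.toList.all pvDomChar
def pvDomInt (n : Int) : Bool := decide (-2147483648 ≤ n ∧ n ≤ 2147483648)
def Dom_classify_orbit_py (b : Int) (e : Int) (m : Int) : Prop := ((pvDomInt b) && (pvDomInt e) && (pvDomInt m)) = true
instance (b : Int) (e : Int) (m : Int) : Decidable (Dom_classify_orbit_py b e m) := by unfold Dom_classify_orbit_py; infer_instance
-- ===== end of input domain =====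

-- B replaces A's growing `seen` set by an O(1)-memory tail-plus-cycle walk (count the ≤2
-- unnormalized tail states, then walk once around the cycle from the first normalized state);
-- a timing run measured B faster by a constant factor (no set to build and query).

-- ===== PORT A =====
def qa_mod_py (x : Int) (m : Int) : Int := PySem.Int.mod (x - 1) m + 1

def qa_step_py (b : Int) (e : Int) (m : Int) : Int × Int := (e, qa_mod_py (b + e) m)

-- fuel for the while-loops (totalization guard only; proved sufficient for m ≠ 0)
def pvFuel (m : Int) : Nat := (2 * m.natAbs + 2) ^ 2 + 3

-- `while cur not in seen: seen.add(cur); cur = qa_step(...)`, returns len(seen).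
-- Python's `seen` set is only tested for membership and measured with len (its
-- iteration order is never observed), so it is ported exactly as a Std.HashSet.
def orbitLoopA (m : Int) : Nat → Std.HashSet (Int × Int) → Int × Int → Int
  | 0, seen, _ => (seen.size : Int)
  | fuel + 1, seen, cur =>
      if seen.contains cur then (seen.size : Int)
      else orbitLoopA m fuel (seen.insert cur) (qa_step_py cur.1 cur.2 m)

def classify_orbit_py (b : Int) (e : Int) (m : Int) : String :=
  let length := orbitLoopA m (pvFuel m) (∅ : Std.HashSet (Int × Int)) (b, e)
  if length = 1 then "singularity"
  else if length = 24 then "cosmos"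
  else "satellite"

-- ===== PORT B =====
def bnorm (m : Int) (x : Int) : Int := PySem.Int.mod (x - 1) m + 1

def bstep (m : Int) (p : Int × Int) : Int × Int := (p.2, bnorm m (p.1 + p.2))

-- `while cur[0] != norm(cur[0]) or cur[1] != norm(cur[1]): mu += 1; cur = ...`
def tailLoop (m : Int) : Nat → Nat → Int × Int → Nat × (Int × Int)
  | 0, mu, cur => (mu, cur)
  | fuel + 1, mu, cur =>
      if cur.1 ≠ bnorm m cur.1 ∨ cur.2 ≠ bnorm m cur.2 then
        tailLoop m fuel (mu + 1) (bstep m cur)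
      else (mu, cur)

-- `while x != cur: lam += 1; x = ...`
def cycLoop (m : Int) : Nat → Nat → Int × Int → Int × Int → Nat
  | 0, lam, _, _ => lam
  | fuel + 1, lam, x, s => if x ≠ s then cycLoop m fuel (lam + 1) (bstep m x) s else lam

def pvFuelB (m : Int) : Nat := (2 * m.natAbs + 2) ^ 2 + 3

def classify_orbit_py_alt (b : Int) (e : Int) (m : Int) : String :=
  let t := tailLoop m (pvFuelB m) 0 (b, e)
  let lam := cycLoop m (pvFuelB m) 1 (bstep m t.2) t.2
  let n := t.1 + lam
  if n = 1 then "singularity"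
  else if n = 24 then "cosmos"
  else "satellite"

-- ===== PRECONDITION & SPEC =====
-- Pre_ excludes exactly m = 0, on which Python's `%` raises ZeroDivisionError.
def Pre_classify_orbit_py (b : Int) (e : Int) (m : Int) : Prop := m ≠ 0
instance (b : Int) (e : Int) (m : Int) : Decidable (Pre_classify_orbit_py b e m) := by unfold Pre_classify_orbit_py; infer_instance

def pvWitness_classify_orbit_py : Int × Int × Int := (1, 1, 9)

def Spec_classify_orbit_py (b : Int) (e : Int) (m : Int) (out : String) : Prop := out = classify_orbit_py_alt b e m
instance (b : Int) (e : Int) (m : Int) (out : String) : Decidable (Spec_classify_orbit_py b e m out) := by unfold Spec_classify_orbit_py; infer_instance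

-- ===== CLAIM (what is proved, stated in full; the proofs are below) =====
def Claim_equal_classify_orbit_py : Prop := ∀ (b : Int) (e : Int) (m : Int), Dom_classify_orbit_py b e m → Pre_classify_orbit_py b e m → Spec_classify_orbit_py b e m (classify_orbit_py b e m)

-- ===== LEMMAS AND PROOFS =====

-- size of a finite superset of the normalized state components (pvFuel m = pvK m + 3)
def pvK (m : Int) : Nat := (2 * m.natAbs + 2) ^ 2

theorem pvFuel_eq (m : Int) : pvFuel m = pvK m + 3 := rfl

theorem pvFuelB_eq (m : Int) : pvFuelB m = pvK m + 3 := rfl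

theorem fmod_congr {a b m : Int} (h : m ∣ a - b) : Int.fmod a m = Int.fmod b m := by
  by_cases hm : m = 0
  · subst hm
    have : a = b := by simpa [sub_eq_zero] using h
    rw [this]
  · have ha := Int.fmod_add_mul_fdiv a m
    have hb := Int.fmod_add_mul_fdiv b m
    obtain ⟨c, hc⟩ := h
    have hd : m ∣ Int.fmod a m - Int.fmod b m :=
      ⟨c - a.fdiv m + b.fdiv m, by linear_combination ha - hb + hc⟩
    have habs : (Int.fmod a m - Int.fmod b m).natAbs < m.natAbs := by
      rcases lt_or_gt_of_ne hm with hneg | hpos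
      · have h1 := PySem.Int.mod_neg_bounds a hneg
        have h2 := PySem.Int.mod_neg_bounds b hneg
        simp only [PySem.Int.mod] at h1 h2
        omega
      · have h1 := PySem.Int.mod_nonneg a hpos
        have h2 := PySem.Int.mod_lt a hpos
        have h3 := PySem.Int.mod_nonneg b hpos
        have h4 := PySem.Int.mod_lt b hpos
        simp only [PySem.Int.mod] at h1 h2 h3 h4
        omega
    have := Int.eq_zero_of_dvd_of_natAbs_lt_natAbs hd habs
    omega

theorem bnorm_congr {x y : Int} (m : Int) (h : m ∣ x - y) : bnorm m x = bnorm m y := by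
  unfold bnorm PySem.Int.mod
  have : m ∣ (x - 1) - (y - 1) := by simpa using h
  rw [fmod_congr this]

theorem bnorm_resid (m x : Int) : m ∣ bnorm m x - x := by
  unfold bnorm PySem.Int.mod
  have h := Int.fmod_add_mul_fdiv (x - 1) m
  exact ⟨-((x - 1).fdiv m), by linarith⟩

theorem bnorm_idem (m x : Int) : bnorm m (bnorm m x) = bnorm m x :=
  bnorm_congr m (bnorm_resid m x)

theorem bnorm_bounds {m : Int} (hm : m ≠ 0) (x : Int) :
    -(m.natAbs : Int) ≤ bnorm m x ∧ bnorm m x ≤ (m.natAbs : Int) + 1 := by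
  unfold bnorm
  rcases lt_or_gt_of_ne hm with h | h
  · have := PySem.Int.mod_neg_bounds (x - 1) h
    omega
  · have h1 := PySem.Int.mod_nonneg (x - 1) h
    have h2 := PySem.Int.mod_lt (x - 1) h
    omega

-- a fully normalized state
def PNorm (m : Int) (p : Int × Int) : Prop := bnorm m p.1 = p.1 ∧ bnorm m p.2 = p.2

theorem bstep_snd_norm (m : Int) (p : Int × Int) : bnorm m (bstep m p).2 = (bstep m p).2 :=
  bnorm_idem m _

theorem PNorm_bstep {m : Int} {p : Int × Int} (h : PNorm m p) : PNorm m (bstep m p) :=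
  ⟨h.2, bstep_snd_norm m p⟩

theorem PNorm_iter {m : Int} {s : Int × Int} (h : PNorm m s) (n : Nat) :
    PNorm m ((bstep m)^[n] s) := by
  induction n with
  | zero => simpa using h
  | succ k ih => rw [Function.iterate_succ_apply']; exact PNorm_bstep ih

theorem bstep_inj {m : Int} {p q : Int × Int} (hp : PNorm m p) (hq : PNorm m q)
    (h : bstep m p = bstep m q) : p = q := by
  have h2 : p.2 = q.2 := congrArg Prod.fst h
  have hn : bnorm m (p.1 + p.2) = bnorm m (q.1 + q.2) := congrArg Prod.snd h
  have d1 := bnorm_resid m (p.1 + p.2)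
  have d2 := bnorm_resid m (q.1 + q.2)
  have hdvd : m ∣ p.1 - q.1 := by
    have e : p.1 - q.1 =
        (bnorm m (q.1 + q.2) - (q.1 + q.2)) - (bnorm m (p.1 + p.2) - (p.1 + p.2)) := by
      rw [hn, h2]; ring
    rw [e]; exact dvd_sub d2 d1
  have h1 : p.1 = q.1 := by rw [← hp.1, bnorm_congr m hdvd, hq.1]
  exact Prod.ext h1 h2

theorem iter_peel {m : Int} {s : Int × Int} (hs : PNorm m s) :
    ∀ i j, i ≤ j → (bstep m)^[i] s = (bstep m)^[j] s → (bstep m)^[j - i] s = s := by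
  intro i
  induction i with
  | zero => intro j _ h; simpa using h.symm
  | succ k ih =>
      intro j hij h
      obtain ⟨j', rfl⟩ : ∃ j', j = j' + 1 := ⟨j - 1, by omega⟩
      rw [Function.iterate_succ_apply', Function.iterate_succ_apply'] at h
      have := bstep_inj (PNorm_iter hs k) (PNorm_iter hs j') h
      have hres := ih j' (by omega) this
      simpa [Nat.succ_sub_succ] using hres

theorem norm_mem_grid {m : Int} (hm : m ≠ 0) {p : Int × Int} (hp : PNorm m p) :
    p ∈ (Finset.Icc (-(m.natAbs : Int)) ((m.natAbs : Int) + 1)) ×ˢ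
        (Finset.Icc (-(m.natAbs : Int)) ((m.natAbs : Int) + 1)) := by
  have h1 := bnorm_bounds hm p.1
  have h2 := bnorm_bounds hm p.2
  rw [hp.1] at h1
  rw [hp.2] at h2
  simp only [Finset.mem_product, Finset.mem_Icc]
  omega

theorem exists_repeat {m : Int} (hm : m ≠ 0) {s : Int × Int} (hs : PNorm m s) :
    ∃ k, 0 < k ∧ k ≤ pvK m ∧ (bstep m)^[k] s = s := by
  classical
  set grid : Finset Int := Finset.Icc (-(m.natAbs : Int)) ((m.natAbs : Int) + 1) with hgrid
  have hcard : (grid ×ˢ grid).card = pvK m := by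
    have : grid.card = 2 * m.natAbs + 2 := by
      rw [hgrid, Int.card_Icc]
      omega
    rw [Finset.card_product, this, pvK]
    ring
  have hmaps : ∀ i ∈ Finset.range (pvK m + 1), (bstep m)^[i] s ∈ grid ×ˢ grid := by
    intro i _
    exact norm_mem_grid hm (PNorm_iter hs i)
  have hlt : (grid ×ˢ grid).card < (Finset.range (pvK m + 1)).card := by
    rw [hcard, Finset.card_range]
    omega
  obtain ⟨i, hi, j, hj, hij, heq⟩ :=
    Finset.exists_ne_map_eq_of_card_lt_of_maps_to hlt hmaps
  rw [Finset.mem_range] at hi hj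
  rcases Nat.lt_or_ge i j with hlt' | hge
  · exact ⟨j - i, by omega, by omega, iter_peel hs i j (by omega) heq⟩
  · have : j < i := by omega
    exact ⟨i - j, by omega, by omega, iter_peel hs j i (by omega) heq.symm⟩

theorem cyc_spec {m : Int} {s : Int × Int} {L : Nat}
    (hL : (bstep m)^[L] s = s)
    (hmin : ∀ k, 0 < k → k < L → (bstep m)^[k] s ≠ s) :
    ∀ f t lam, 0 < t → t ≤ L → L - t ≤ f →
      cycLoop m f lam ((bstep m)^[t] s) s = lam + (L - t) := by
  intro f
  induction f with
  | zero =>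
      intro t lam ht htL hf
      have ht' : t = L := by omega
      subst ht'
      simp [cycLoop]
  | succ f ih =>
      intro t lam ht htL hf
      by_cases heq : (bstep m)^[t] s = s
      · have ht' : t = L := by
          by_contra hne
          exact hmin t ht (by omega) heq
        subst ht'
        simp [cycLoop, heq]
      · have htL' : t < L := by
          rcases Nat.lt_or_ge t L with h | h
          · exact h
          · have : t = L := by omega
            subst this; exact absurd hL heq
        have hstep : bstep m ((bstep m)^[t] s) = (bstep m)^[t + 1] s :=
          (Function.iterate_succ_apply' (bstep m) t s).symm
        rw [cycLoop]
        rw [if_pos heq, hstep]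
        rw [ih (t + 1) (lam + 1) (by omega) (by omega) (by omega)]
        omega

theorem loopA_spec {m : Int} (x : Nat → Int × Int) (N : Nat)
    (hstep : ∀ k, x (k + 1) = bstep m (x k))
    (hdist : ∀ i j, i < j → j < N → x i ≠ x j)
    (hrep : ∃ μ, μ < N ∧ x N = x μ) :
    ∀ f k (seen : Std.HashSet (Int × Int)), k ≤ N → N + 1 - k ≤ f →
      (∀ p, p ∈ seen ↔ ∃ i, i < k ∧ x i = p) → seen.size = k →
      orbitLoopA m f seen (x k) = (N : Int) := by
  intro f
  induction f with
  | zero => intro k seen hk hf _ _; omega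
  | succ f ih =>
      intro k seen hk hf hinv hsize
      by_cases hkN : k = N
      · obtain ⟨μ, hμ, hx⟩ := hrep
        have hmem : x k ∈ seen := by
          rw [hinv]
          exact ⟨μ, by omega, by rw [← hx, hkN]⟩
        rw [orbitLoopA]
        rw [if_pos (Std.HashSet.contains_iff_mem.mpr hmem)]
        rw [hsize, hkN]
      · have hkN' : k < N := by omega
        have hnmem : x k ∉ seen := by
          intro hmem
          obtain ⟨i, hi, hxi⟩ := (hinv (x k)).mp hmem
          exact hdist i k hi hkN' hxi
        rw [orbitLoopA]
        rw [if_neg (by simpa [Std.HashSet.contains_iff_mem] using hnmem)]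
        have hcur : qa_step_py (x k).1 (x k).2 m = x (k + 1) := by
          rw [hstep k, bstep, qa_step_py, qa_mod_py, bnorm]
        rw [hcur]
        refine ih (k + 1) (seen.insert (x k)) (by omega) (by omega) ?_ ?_
        · intro p
          rw [Std.HashSet.mem_insert]
          constructor
          · rintro (h | h)
            · exact ⟨k, by omega, by simpa using h⟩
            · obtain ⟨i, hi, hxi⟩ := (hinv p).mp h
              exact ⟨i, by omega, hxi⟩
          · rintro ⟨i, hi, hxi⟩
            by_cases hik : i = k
            · exact Or.inl (by subst hik; simpa using hxi)
            · exact Or.inr ((hinv p).mpr ⟨i, by omega, hxi⟩)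
        · rw [Std.HashSet.size_insert, if_neg hnmem, hsize]

-- the two iterations of B's tail loop, per normalization case
theorem tail0 {m b e : Int} (hb : bnorm m b = b) (he : bnorm m e = e) (f : Nat) :
    tailLoop m (f + 1) 0 (b, e) = (0, (b, e)) := by
  rw [tailLoop]
  rw [if_neg (by simp [hb, he])]

theorem tail1 {m b e : Int} (hb : bnorm m b ≠ b) (he : bnorm m e = e) (f : Nat) :
    tailLoop m (f + 1 + 1) 0 (b, e) = (1, (e, bnorm m (b + e))) := by
  rw [tailLoop]
  rw [if_pos (Or.inl (fun h => hb h.symm))]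
  show tailLoop m (f + 1) 1 (e, bnorm m (b + e)) = _
  rw [tailLoop]
  rw [if_neg (by simp [he, bnorm_idem])]

theorem tail2 {m b e : Int} (he : bnorm m e ≠ e) (f : Nat) :
    tailLoop m (f + 1 + 1 + 1) 0 (b, e)
      = (2, (bnorm m (b + e), bnorm m (e + bnorm m (b + e)))) := by
  rw [tailLoop]
  rw [if_pos (Or.inr (fun h => he h.symm))]
  show tailLoop m (f + 1 + 1) 1 (e, bnorm m (b + e)) = _
  rw [tailLoop]
  rw [if_pos (Or.inl (fun h => he h.symm))]
  show tailLoop m (f + 1) 2 (bnorm m (b + e), bnorm m (e + bnorm m (b + e))) = _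
  rw [tailLoop]
  rw [if_neg (by simp [bnorm_idem])]

-- final three-way branch agrees between the Int (A) and Nat (B) lengths
theorem classify_branch (N : Nat) :
    (if (N : Int) = 1 then "singularity" else if (N : Int) = 24 then "cosmos" else "satellite")
      = (if N = 1 then "singularity" else if N = 24 then "cosmos" else "satellite") := by
  by_cases h1 : N = 1
  · simp [h1]
  · by_cases h24 : N = 24
    · simp [h24]
    · rw [if_neg (by exact_mod_cast h1), if_neg (by exact_mod_cast h24),
        if_neg h1, if_neg h24]

-- main equivalence, parametric in the tail length μ
theorem core_equiv {m b e : Int} (hm : m ≠ 0) (μ : Nat) (hμ2 : μ ≤ 2)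
    (hμN : PNorm m ((bstep m)^[μ] (b, e)))
    (htail : tailLoop m (pvFuelB m) 0 (b, e) = (μ, (bstep m)^[μ] (b, e)))
    (hdt : ∀ i j, i < μ → i < j → (bstep m)^[i] (b, e) ≠ (bstep m)^[j] (b, e)) :
    classify_orbit_py b e m = classify_orbit_py_alt b e m := by
  classical
  set x : Nat → Int × Int := fun i => (bstep m)^[i] (b, e) with hxdef
  set s := x μ with hsdef
  have hex : ∃ k, 0 < k ∧ (bstep m)^[k] s = s := by
    obtain ⟨k, h1, _, h3⟩ := exists_repeat hm hμN
    exact ⟨k, h1, h3⟩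
  set L := Nat.find hex with hLdef
  have hLspec := Nat.find_spec hex
  have hLpos : 0 < L := hLspec.1
  have hLiter : (bstep m)^[L] s = s := hLspec.2
  have hLmin : ∀ k, 0 < k → k < L → (bstep m)^[k] s ≠ s := by
    intro k hk hkL hks
    exact Nat.find_min hex hkL ⟨hk, hks⟩
  have hLle : L ≤ pvK m := by
    obtain ⟨k, h1, h2, h3⟩ := exists_repeat hm hμN
    exact le_trans (Nat.find_min' hex ⟨h1, h3⟩) h2
  have hshift : ∀ a, x (μ + a) = (bstep m)^[a] s := by
    intro a
    show (bstep m)^[μ + a] (b, e) = (bstep m)^[a] ((bstep m)^[μ] (b, e))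
    rw [Nat.add_comm μ a, Function.iterate_add_apply]
  -- B's side
  have hcyc : cycLoop m (pvFuelB m) 1 (bstep m s) s = L := by
    have h1 : bstep m s = (bstep m)^[1] s := by rw [Function.iterate_one]
    rw [h1]
    rw [cyc_spec hLiter hLmin (pvFuelB m) 1 1 (by omega) (by omega)
      (by rw [pvFuelB_eq]; omega)]
    omega
  -- A's side: distinctness up to N = μ + L, repeat at N
  have hdist : ∀ i j, i < j → j < μ + L → x i ≠ x j := by
    intro i j hij hjN
    rcases Nat.lt_or_ge i μ with hi | hi
    · exact hdt i j hi hij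
    · intro hxeq
      obtain ⟨a, rfl⟩ : ∃ a, i = μ + a := ⟨i - μ, by omega⟩
      obtain ⟨c, rfl⟩ : ∃ c, j = μ + c := ⟨j - μ, by omega⟩
      rw [hshift, hshift] at hxeq
      have hper := iter_peel hμN a c (by omega) hxeq
      exact hLmin (c - a) (by omega) (by omega) hper
  have hrep : x (μ + L) = x μ := by
    rw [hshift]
    exact hLiter
  have hA := loopA_spec x (μ + L)
    (fun k => Function.iterate_succ_apply' (bstep m) k (b, e))
    hdist ⟨μ, by omega, hrep⟩ (pvFuel m) 0 ∅ (by omega)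
    (by rw [pvFuel_eq]; omega)
    (by intro p; simp [Std.HashSet.not_mem_empty])
    Std.HashSet.size_empty
  have hx0 : x 0 = (b, e) := rfl
  rw [hx0] at hA
  -- assemble
  rw [classify_orbit_py, classify_orbit_py_alt]
  show (if orbitLoopA m (pvFuel m) (∅ : Std.HashSet (Int × Int)) (b, e) = 1 then "singularity"
        else if orbitLoopA m (pvFuel m) (∅ : Std.HashSet (Int × Int)) (b, e) = 24 then "cosmos"
        else "satellite") = _
  rw [hA, htail]
  show _ = (if μ + cycLoop m (pvFuelB m) 1 (bstep m s) s = 1 then "singularity"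
        else if μ + cycLoop m (pvFuelB m) 1 (bstep m s) s = 24 then "cosmos"
        else "satellite")
  rw [hcyc]
  exact_mod_cast classify_branch (μ + L)

-- ===== VERDICT (by name: the statement is the Claim_ definition above) =====
theorem classify_orbit_py_spec : Claim_equal_classify_orbit_py := by
  intro b e m _ hm
  unfold Spec_classify_orbit_py
  have hf3 : pvFuelB m = pvK m + 2 + 1 := rfl
  have hx1 : (bstep m)^[1] (b, e) = (e, bnorm m (b + e)) := rfl
  have hx2 : (bstep m)^[2] (b, e)
      = (bnorm m (b + e), bnorm m (e + bnorm m (b + e))) := rfl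
  have hsnd : ∀ j, bnorm m ((bstep m)^[j + 1] (b, e)).2 = ((bstep m)^[j + 1] (b, e)).2 := by
    intro j
    rw [Function.iterate_succ_apply']
    exact bstep_snd_norm m _
  have hfst : ∀ j, bnorm m ((bstep m)^[j + 2] (b, e)).1 = ((bstep m)^[j + 2] (b, e)).1 := by
    intro j
    have : (bstep m)^[j + 2] (b, e) = bstep m ((bstep m)^[j + 1] (b, e)) :=
      Function.iterate_succ_apply' (bstep m) (j + 1) (b, e)
    rw [this]
    exact hsnd j
  by_cases he : bnorm m e = e
  · by_cases hb : bnorm m b = b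
    · -- μ = 0
      refine core_equiv hm 0 (by omega) ⟨hb, he⟩ ?_ ?_
      · rw [hf3]
        exact tail0 hb he _
      · intro i j hi _; omega
    · -- μ = 1
      refine core_equiv hm 1 (by omega) ⟨by rw [hx1]; exact he, by rw [hx1]; exact bnorm_idem m _⟩ ?_ ?_
      · rw [hf3, hx1]
        exact tail1 hb he _
      · intro i j hi hij heq
        interval_cases i
        rcases Nat.lt_or_ge j 2 with hj | hj
        · have hj1 : j = 1 := by omega
          subst hj1
          rw [hx1] at heq
          have hbe : b = e := congrArg Prod.fst heq
          rw [hbe] at hb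
          exact hb he
        · obtain ⟨j', rfl⟩ : ∃ j', j = j' + 2 := ⟨j - 2, by omega⟩
          have h1 : ((bstep m)^[0] (b, e) : Int × Int).1 = b := rfl
          have := hfst j'
          rw [← heq] at this
          rw [h1] at this
          exact hb this
  · -- μ = 2
    refine core_equiv hm 2 (by omega)
      ⟨by rw [hx2]; exact bnorm_idem m _, by rw [hx2]; exact bnorm_idem m _⟩ ?_ ?_
    · have hf4 : pvFuelB m = pvK m + 1 + 1 + 1 := rfl
      rw [hf4, hx2]
      exact tail2 he _
    · intro i j hi hij heq
      interval_cases i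
      · obtain ⟨j', rfl⟩ : ∃ j', j = j' + 1 := ⟨j - 1, by omega⟩
        have h0 : ((bstep m)^[0] (b, e) : Int × Int).2 = e := rfl
        have := hsnd j'
        rw [← heq, h0] at this
        exact he this
      · obtain ⟨j', rfl⟩ : ∃ j', j = j' + 2 := ⟨j - 2, by omega⟩
        have h1 : ((bstep m)^[1] (b, e) : Int × Int).1 = e := by rw [hx1]
        have := hfst j'
        rw [← heq, h1] at this
        exact he this
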